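-- pv_equiv track=rewrite | github.com/vickyzhang7/Python-Data-Analysis-Project | Project 2-Time series forecasting model/problem3.py | ensemble_label
-- ===== SOURCE A (Python) =====
-- def ensemble_label(predicted_2, predicted_3, predicted_4):
--     # ensemble label is '-' when predict label is --+, -+-.+--,---
--     ensembel_label = ""
--     for i in range(len(predicted_2)):
--         if predicted_2[i] == predicted_3[i] == "-":
--             ensembel_label += "-"
--         elif predicted_2[i] == predicted_4[i] == "-":
--             ensembel_label += "-"
--         elif predicted_3[i] == predicted_4[i] == "-":
--             ensembel_label += "-"
--         elif predicted_2[i] == predicted_3[i] == predicted_4[i] == "-":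
--             ensembel_label += "-"
--         else:
--             ensembel_label += "+"
--     return ensembel_label
-- ===== SOURCE B (Python) =====
-- def _minus_positions(s):
--     # set of positions holding '-'
--     return {i for i, c in enumerate(s) if c == "-"}
--
--
-- def ensemble_label(predicted_2, predicted_3, predicted_4):
--     # Staged set passes: collect each string's '-' positions (the 2nd/3rd string
--     # truncated to len(predicted_2)), mark a position when some PAIR of the three
--     # sets shares it (majority as union of pairwise intersections), then render.
--     n = len(predicted_2)
--     s2 = _minus_positions(predicted_2)
--     s3 = _minus_positions(predicted_3[:n])
--     s4 = _minus_positions(predicted_4[:n])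
--     minus = (s2 & s3) | (s2 & s4) | (s3 & s4)
--     return "".join("-" if i in minus else "+" for i in range(n))
-- ===== Notes on version B (the rewrite author's own statement) =====
-- stated objective: alternative
-- what changed: Replaces A's single per-index branch-cascade loop by staged set passes: build the set of '-' positions of each string, take the union of the three pairwise intersections as the majority set, then render the result from that set.
import Mathlib
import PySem

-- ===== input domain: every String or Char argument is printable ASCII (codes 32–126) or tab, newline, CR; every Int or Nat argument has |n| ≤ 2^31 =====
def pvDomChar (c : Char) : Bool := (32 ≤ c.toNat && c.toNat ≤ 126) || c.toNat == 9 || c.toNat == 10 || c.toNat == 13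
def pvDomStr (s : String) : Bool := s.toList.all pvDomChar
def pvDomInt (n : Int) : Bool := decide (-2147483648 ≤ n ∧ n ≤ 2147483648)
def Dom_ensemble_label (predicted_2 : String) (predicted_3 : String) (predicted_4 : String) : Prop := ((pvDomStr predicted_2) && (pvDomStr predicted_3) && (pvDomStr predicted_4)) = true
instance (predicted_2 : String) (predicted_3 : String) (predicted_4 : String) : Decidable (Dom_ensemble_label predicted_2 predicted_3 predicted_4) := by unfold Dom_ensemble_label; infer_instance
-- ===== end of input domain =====

-- B replaces A's per-index branch-cascade loop by staged set passes: per-string sets of '-'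
-- positions, union of pairwise intersections, then rendering ('alternative', same cost).

-- ===== PORT A =====
-- A's per-position branch cascade, branches in A's order (the 4th branch is unreachable, kept faithfully).
def pvStepA (c2 c3 c4 : Char) : Char :=
  if c2 = c3 ∧ c3 = '-' then '-'
  else if c2 = c4 ∧ c4 = '-' then '-'
  else if c3 = c4 ∧ c4 = '-' then '-'
  else if c2 = c3 ∧ c3 = c4 ∧ c4 = '-' then '-'
  else '+'

-- the loop `for i in range(len(predicted_2)): ensembel_label += …` as a foldl over the index range
def ensemble_label (predicted_2 : String) (predicted_3 : String) (predicted_4 : String) : String :=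
  let l2 := predicted_2.toList; let l3 := predicted_3.toList; let l4 := predicted_4.toList
  String.mk ((List.range l2.length).foldl
    (fun acc i => acc ++ [pvStepA (l2.getD i ' ') (l3.getD i ' ') (l4.getD i ' ')]) [])

-- ===== PORT B =====
-- `_minus_positions(s)` = {i for i, c in enumerate(s) if c == "-"}
def pvMinusSet (l : List Char) : PySem.Set Int :=
  PySem.Set.ofList ((PySem.List.enumerate l 0).filterMap
    (fun p => if p.2 = '-' then some p.1 else none))

-- s2/s3/s4 (the latter two over the [:n] slices), minus = (s2&s3)|(s2&s4)|(s3&s4), then ''.join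
def ensemble_label_alt (predicted_2 : String) (predicted_3 : String) (predicted_4 : String) : String :=
  let n := predicted_2.toList.length
  let s2 := pvMinusSet predicted_2.toList
  let s3 := pvMinusSet (PySem.List.slice predicted_3.toList none (some (n : Int)))
  let s4 := pvMinusSet (PySem.List.slice predicted_4.toList none (some (n : Int)))
  let minus := PySem.Set.union (PySem.Set.union (PySem.Set.inter s2 s3) (PySem.Set.inter s2 s4))
                               (PySem.Set.inter s3 s4)
  String.mk ((List.range n).map (fun (i : Nat) => if PySem.Set.contains minus (Int.ofNat i) then '-' else '+'))

-- ===== PRECONDITION & SPEC =====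
-- Pre_ holds exactly where Python A returns: at each position A reads predicted_3[i] always and
-- predicted_4[i] unless the first branch (both '-') fires; anywhere else it raises IndexError.
def Pre_ensemble_label (predicted_2 : String) (predicted_3 : String) (predicted_4 : String) : Prop :=
  ((List.range predicted_2.toList.length).all (fun i =>
    decide (i < predicted_3.toList.length) &&
    ((decide (predicted_2.toList.getD i ' ' = '-') && decide (predicted_3.toList.getD i ' ' = '-')) ||
     decide (i < predicted_4.toList.length)))) = true
instance (predicted_2 : String) (predicted_3 : String) (predicted_4 : String) : Decidable (Pre_ensemble_label predicted_2 predicted_3 predicted_4) := by unfold Pre_ensemble_label; infer_instance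

def pvWitness_ensemble_label : String × String × String := ("+-+", "--+", "-+-")

def Spec_ensemble_label (predicted_2 : String) (predicted_3 : String) (predicted_4 : String) (out : String) : Prop := out = ensemble_label_alt predicted_2 predicted_3 predicted_4
instance (predicted_2 : String) (predicted_3 : String) (predicted_4 : String) (out : String) : Decidable (Spec_ensemble_label predicted_2 predicted_3 predicted_4 out) := by unfold Spec_ensemble_label; infer_instance

-- ===== CLAIM (what is proved, stated in full; the proofs are below) =====
def Claim_equal_ensemble_label : Prop := ∀ (predicted_2 : String) (predicted_3 : String) (predicted_4 : String), Dom_ensemble_label predicted_2 predicted_3 predicted_4 → Pre_ensemble_label predicted_2 predicted_3 predicted_4 → Spec_ensemble_label predicted_2 predicted_3 predicted_4 (ensemble_label predicted_2 predicted_3 predicted_4)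

-- ===== LEMMAS AND PROOFS =====

-- membership in a `_minus_positions` set
lemma mem_pvMinusSet (l : List Char) (x : Int) :
    x ∈ pvMinusSet l ↔ ∃ k : Nat, k < l.length ∧ x = (k : Int) ∧ l.getD k ' ' = '-' := by
  unfold pvMinusSet
  rw [PySem.Set.mem_ofList]
  simp only [List.mem_filterMap, PySem.List.mem_enumerate_iff]
  constructor
  · rintro ⟨⟨j, c⟩, ⟨k, hk, hp⟩, hif⟩
    cases hp
    by_cases hc : l[k] = '-'
    · simp only [hc, if_pos] at hif
      refine ⟨k, hk, ?_, ?_⟩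
      · simp at hif; omega
      · simp [List.getD_eq_getElem?_getD, List.getElem?_eq_getElem hk, hc]
    · simp [hc] at hif
  · rintro ⟨k, hk, rfl, hc⟩
    have hck : l[k] = '-' := by
      simpa [List.getD_eq_getElem?_getD, List.getElem?_eq_getElem hk] using hc
    exact ⟨((k : Int), l[k]), ⟨k, hk, by simp⟩, by simp [hck]⟩

-- A's cascade as a single majority disjunction on the three characters
lemma pvStepA_eq (c2 c3 c4 : Char) :
    pvStepA c2 c3 c4 =
      (if (c2 = '-' ∧ c3 = '-') ∨ (c2 = '-' ∧ c4 = '-') ∨ (c3 = '-' ∧ c4 = '-') then '-' else '+') := by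
  unfold pvStepA
  by_cases h2 : c2 = '-' <;> by_cases h3 : c3 = '-' <;> by_cases h4 : c4 = '-' <;>
    simp [h2, h3, h4]

-- abbreviation (proof-side) for B's `minus` set, as ensemble_label_alt builds it
def pvBig (l2 l3 l4 : List Char) : PySem.Set Int :=
  PySem.Set.union (PySem.Set.union
      (PySem.Set.inter (pvMinusSet l2) (pvMinusSet (PySem.List.slice l3 none (some (l2.length : Int)))))
      (PySem.Set.inter (pvMinusSet l2) (pvMinusSet (PySem.List.slice l4 none (some (l2.length : Int))))))
    (PySem.Set.inter (pvMinusSet (PySem.List.slice l3 none (some (l2.length : Int))))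
      (pvMinusSet (PySem.List.slice l4 none (some (l2.length : Int)))))

-- Mathlib's default `BEq Int` is `instBEqOfDecidableEq`; this is its (kernel-friendly) lawfulness witness
@[reducible] def pvLawfulBEqInt : @LawfulBEq Int instBEqOfDecidableEq :=
  { eq_of_beq := fun h => of_decide_eq_true h, rfl := fun {_a} => decide_eq_true rfl }

-- per position i < n satisfying Pre's condition at i, A's cascade equals B's set test
lemma pvStep_eq_set (l2 l3 l4 : List Char) (i : Nat) (hi : i < l2.length)
    (h3 : i < l3.length)
    (hP : (l2.getD i ' ' = '-' ∧ l3.getD i ' ' = '-') ∨ i < l4.length) :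
    pvStepA (l2.getD i ' ') (l3.getD i ' ') (l4.getD i ' ') =
      (if PySem.Set.contains (pvBig l2 l3 l4) (i : Int) then '-' else '+') := by
  have hmem : ∀ (l : List Char), ((i : Int) ∈ pvMinusSet l ↔ i < l.length ∧ l.getD i ' ' = '-') := by
    intro l
    rw [mem_pvMinusSet]
    constructor
    · rintro ⟨k, hk, hki, hc⟩
      have hik : k = i := by exact_mod_cast hki.symm
      subst hik; exact ⟨hk, hc⟩
    · rintro ⟨hk, hc⟩; exact ⟨i, hk, rfl, hc⟩
  have hs2 : ((i : Int) ∈ pvMinusSet l2) ↔ l2.getD i ' ' = '-' := by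
    rw [hmem]; exact ⟨fun h => h.2, fun h => ⟨hi, h⟩⟩
  have htake : ∀ (l : List Char),
      (((i : Int) ∈ pvMinusSet (PySem.List.slice l none (some (l2.length : Int)))) ↔
        i < l.length ∧ l.getD i ' ' = '-') := by
    intro l
    rw [PySem.List.slice_to_natCast, hmem]
    have h1 : (l.take l2.length).getD i ' ' = l.getD i ' ' := by
      simp [List.getD_eq_getElem?_getD, hi]
    have h2 : i < (l.take l2.length).length ↔ i < l.length := by
      rw [List.length_take]; omega
    rw [h1, h2]
  have hs3 : ((i : Int) ∈ pvMinusSet (PySem.List.slice l3 none (some (l2.length : Int)))) ↔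
      l3.getD i ' ' = '-' := by
    rw [htake l3]; exact ⟨fun h => h.2, fun h => ⟨h3, h⟩⟩
  have hs4 := htake l4
  have hmemS : ((i : Int) ∈ pvBig l2 l3 l4) ↔
      ((l2.getD i ' ' = '-' ∧ l3.getD i ' ' = '-') ∨
       (l2.getD i ' ' = '-' ∧ (i < l4.length ∧ l4.getD i ' ' = '-')) ∨
       (l3.getD i ' ' = '-' ∧ (i < l4.length ∧ l4.getD i ' ' = '-'))) := by
    rw [pvBig, PySem.Set.mem_union, PySem.Set.mem_union, PySem.Set.mem_inter, PySem.Set.mem_inter,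
        PySem.Set.mem_inter, hs2, hs3, hs4]
    tauto
  rw [pvStepA_eq]
  by_cases hd : (l2.getD i ' ' = '-' ∧ l3.getD i ' ' = '-') ∨
      (l2.getD i ' ' = '-' ∧ l4.getD i ' ' = '-') ∨ (l3.getD i ' ' = '-' ∧ l4.getD i ' ' = '-')
  · have hin : ((l2.getD i ' ' = '-' ∧ l3.getD i ' ' = '-') ∨
        (l2.getD i ' ' = '-' ∧ (i < l4.length ∧ l4.getD i ' ' = '-')) ∨
        (l3.getD i ' ' = '-' ∧ (i < l4.length ∧ l4.getD i ' ' = '-'))) := by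
      rcases hP with hab | h4
      · exact Or.inl hab
      · rcases hd with h | h | h
        · exact Or.inl h
        · exact Or.inr (Or.inl ⟨h.1, h4, h.2⟩)
        · exact Or.inr (Or.inr ⟨h.1, h4, h.2⟩)
    have hb := (@PySem.Set.contains_iff Int _ pvLawfulBEqInt _ _).mpr (hmemS.mpr hin)
    rw [if_pos hd, hb]
    rfl
  · have hb : PySem.Set.contains (pvBig l2 l3 l4) (i : Int) = false := by
      rw [Bool.eq_false_iff]
      intro hc
      have hm := hmemS.mp ((@PySem.Set.contains_iff Int _ pvLawfulBEqInt _ _).mp hc)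
      rcases hm with h | h | h
      · exact hd (Or.inl h)
      · exact hd (Or.inr (Or.inl ⟨h.1, h.2.2⟩))
      · exact hd (Or.inr (Or.inr ⟨h.1, h.2.2⟩))
    rw [if_neg hd, hb]
    rfl

-- ===== VERDICT (by name: the statement is the Claim_ definition above) =====
theorem ensemble_label_spec : Claim_equal_ensemble_label := by
  intro p2 p3 p4 _ hpre
  unfold Spec_ensemble_label ensemble_label ensemble_label_alt
  simp only [PySem.List.foldl_append_singleton_eq_map]
  unfold Pre_ensemble_label at hpre
  rw [List.all_eq_true] at hpre
  refine congrArg String.mk (List.map_congr_left ?_)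
  intro i hi
  rw [List.mem_range] at hi
  have h := hpre i (List.mem_range.mpr hi)
  simp only [Bool.and_eq_true, Bool.or_eq_true, decide_eq_true_eq] at h
  exact pvStep_eq_set p2.toList p3.toList p4.toList i hi h.1 h.2
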